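-- pv_equiv track=rewrite | github.com/aeima1010/mindmap--v1 | api/index.py | _unescape_json_string_fragment
-- ===== SOURCE A (Python) =====
-- def _unescape_json_string_fragment(s: str) -> str:
--     out: list[str] = []
--     i = 0
--     while i < len(s):
--         if s[i] == "\\" and i + 1 < len(s):
--             nxt = s[i + 1]
--             if nxt == "n":
--                 out.append("\n")
--             elif nxt == "t":
--                 out.append("\t")
--             elif nxt == "r":
--                 out.append("\r")
--             elif nxt in '"\\':
--                 out.append(nxt)
--             else:
--                 out.append(s[i : i + 2])
--             i += 2
--             continue
--         out.append(s[i])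
--         i += 1
--     return "".join(out)
-- ===== SOURCE B (Python) =====
-- import re
--
-- _ESCAPES = {"n": "\n", "t": "\t", "r": "\r", '"': '"', "\\": "\\"}
--
-- def _unescape_json_string_fragment(s: str) -> str:
--     return re.sub(
--         r"\\(.)",
--         lambda m: _ESCAPES.get(m.group(1), m.group(0)),
--         s,
--         flags=re.DOTALL,
--     )
-- ===== Notes on version B (the rewrite author's own statement) =====
-- stated objective: faster
-- what changed: Replaced A's per-character Python-level while loop (index arithmetic, if/elif dispatch, output list, join) by a single re.sub over the pattern \\(.) with DOTALL whose callback maps the captured escape char through a table and returns the whole match for unknown escapes; the left-to-right non-overlapping scan is done by the C regex engine, a lone trailing backslash stays unmatched and preserved.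
import Mathlib
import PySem

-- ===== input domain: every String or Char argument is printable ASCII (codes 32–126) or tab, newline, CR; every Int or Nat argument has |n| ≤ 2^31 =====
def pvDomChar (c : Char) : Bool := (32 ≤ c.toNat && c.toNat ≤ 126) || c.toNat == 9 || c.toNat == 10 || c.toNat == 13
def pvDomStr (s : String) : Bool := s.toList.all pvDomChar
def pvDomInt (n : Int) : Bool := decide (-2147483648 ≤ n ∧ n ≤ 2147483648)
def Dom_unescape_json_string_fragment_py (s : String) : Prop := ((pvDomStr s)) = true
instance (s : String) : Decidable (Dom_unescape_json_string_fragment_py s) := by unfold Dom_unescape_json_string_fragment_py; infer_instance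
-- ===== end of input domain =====

-- B rewrites A's index-based while loop as a single regex substitution driven by an escape table (objective: idiomatic).

-- ===== PORT A =====
-- A's while loop over index i, appending string fragments to `out`; joined at the end.
def pvALoop (cs : List Char) (i : Nat) : List (List Char) :=
  if h : i < cs.length then
    if cs[i] = '\\' ∧ i + 1 < cs.length then
      let nxt := cs[i + 1]!
      let frag : List Char :=
        if nxt = 'n' then ['\n']
        else if nxt = 't' then ['\t']
        else if nxt = 'r' then ['\r']
        else if nxt = '"' ∨ nxt = '\\' then [nxt]
        else (cs.drop i).take 2          -- s[i : i+2]
      frag :: pvALoop cs (i + 2)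
    else
      [cs[i]] :: pvALoop cs (i + 1)
  else []
termination_by cs.length - i

def unescape_json_string_fragment_py (s : String) : String :=
  String.mk (pvALoop s.toList 0).flatten   -- "".join(out)

-- ===== PORT B =====
-- the escape table _ESCAPES
def pvEscMap : PySem.Dict Char (List Char) :=
  PySem.Dict.ofList [('n', ['\n']), ('t', ['\t']), ('r', ['\r']), ('"', ['"']), ('\\', ['\\'])]

-- re.sub(r"\\(.)", …, s, DOTALL): the regex engine's left-to-right non-overlapping scan;
-- on a match the callback looks the captured char up in the table, defaulting to the whole match.
def pvBSub : List Char → List Char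
  | '\\' :: c :: rest => pvEscMap.getD c ['\\', c] ++ pvBSub rest
  | c :: rest => c :: pvBSub rest
  | [] => []

def unescape_json_string_fragment_py_alt (s : String) : String :=
  String.mk (pvBSub s.toList)

-- ===== PRECONDITION & SPEC =====
def Spec_unescape_json_string_fragment_py (s : String) (out : String) : Prop := out = unescape_json_string_fragment_py_alt s
instance (s : String) (out : String) : Decidable (Spec_unescape_json_string_fragment_py s out) := by unfold Spec_unescape_json_string_fragment_py; infer_instance

-- ===== CLAIM (what is proved, stated in full; the proofs are below) =====
def Claim_equal_unescape_json_string_fragment_py : Prop := ∀ (s : String), Dom_unescape_json_string_fragment_py s → Spec_unescape_json_string_fragment_py s (unescape_json_string_fragment_py s)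

-- ===== LEMMAS AND PROOFS =====

-- pvBSub steps over a non-backslash head one character at a time.
theorem pvBSub_cons_ne (c : Char) (l : List Char) (h : ¬ c = '\\') :
    pvBSub (c :: l) = c :: pvBSub l := by
  conv_lhs => rw [pvBSub.eq_def]
  split
  · simp_all
  · simp_all
  · simp_all

-- A's loop from index i computes B's scan of the suffix cs.drop i.
theorem pvALoop_eq_pvBSub (cs : List Char) (i : Nat) :
    (pvALoop cs i).flatten = pvBSub (cs.drop i) := by
  fun_induction pvALoop cs i with
  | case1 i h hesc nxt frag ih =>
    obtain ⟨hbs, h1⟩ := hesc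
    have hd : cs.drop i = '\\' :: nxt :: cs.drop (i + 2) := by
      rw [List.drop_eq_getElem_cons h, hbs, List.drop_eq_getElem_cons h1]
      simp [nxt, getElem!_pos, h1]
    rw [hd]
    show frag ++ (pvALoop cs (i + 2)).flatten = _
    rw [ih]
    simp only [pvBSub]
    congr 1
    have ht : (cs.drop i).take 2 = ['\\', nxt] := by rw [hd]; rfl
    simp only [frag, ht, pvEscMap]
    clear_value frag
    clear frag hd ht ih
    clear_value nxt
    rcases eq_or_ne nxt 'n' with rfl | hn
    · rfl
    rcases eq_or_ne nxt 't' with rfl | ht'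
    · rfl
    rcases eq_or_ne nxt 'r' with rfl | hr
    · rfl
    rcases eq_or_ne nxt '"' with rfl | hq
    · rfl
    rcases eq_or_ne nxt '\\' with rfl | hb
    · rfl
    have bn : ('n' == nxt) = false := beq_eq_false_iff_ne.mpr (Ne.symm hn)
    have bt : ('t' == nxt) = false := beq_eq_false_iff_ne.mpr (Ne.symm ht')
    have br : ('r' == nxt) = false := beq_eq_false_iff_ne.mpr (Ne.symm hr)
    have bq : ('\"' == nxt) = false := beq_eq_false_iff_ne.mpr (Ne.symm hq)
    have bb : ('\\' == nxt) = false := beq_eq_false_iff_ne.mpr (Ne.symm hb)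
    simp [hn, ht', hr, hq, hb, bn, bt, br, bq, bb, PySem.Dict.getD, PySem.Dict.ofList,
      PySem.Dict.get?, PySem.Dict.update, PySem.Dict.insert, PySem.Dict.contains,
      PySem.Dict.empty, List.find?]
  | case2 i h hesc ih =>
    rw [List.drop_eq_getElem_cons h]
    show [cs[i]] ++ (pvALoop cs (i + 1)).flatten = _
    rw [ih]
    rcases eq_or_ne cs[i] '\\' with hbs | hbs
    · have h1 : ¬ i + 1 < cs.length := by tauto
      have hnil : cs.drop (i + 1) = [] := List.drop_eq_nil_of_le (by omega)
      rw [hbs, hnil]; rfl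
    · rw [pvBSub_cons_ne _ _ hbs]; rfl
  | case3 i h =>
    rw [List.drop_eq_nil_of_le (by omega)]; rfl

-- ===== VERDICT (by name: the statement is the Claim_ definition above) =====
theorem unescape_json_string_fragment_py_spec : Claim_equal_unescape_json_string_fragment_py := by
  intro s _
  unfold Spec_unescape_json_string_fragment_py unescape_json_string_fragment_py unescape_json_string_fragment_py_alt
  rw [pvALoop_eq_pvBSub s.toList 0, List.drop_zero]
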